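-- pv_equiv track=rewrite | github.com/SMAPPNYU/crowdsourcing_factchecking_public | code/.ipynb_checkpoints/functions-checkpoint.py | array_return
-- ===== SOURCE A (Python) =====
-- def array_return(input_array, length = 2):
--
-- 	keep_list = []
-- 	l_count = 0
-- 	c_count = 0
-- 	m_count = 0
--
-- 	for this_person in input_array:
--
-- 		if this_person < 0 and l_count < length:
--
-- 			keep_list.append(True)
--
-- 			l_count += 1
--
-- 		elif this_person > 0 and c_count < length:
--
-- 			c_count += 1
--
-- 			keep_list.append(True)
--
-- 		elif this_person == 0 and m_count < length:
--
-- 			keep_list.append(True)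
--
-- 			m_count += 1
--
-- 		else:
--
-- 			keep_list.append(False)
--
-- 	return keep_list
-- ===== SOURCE B (Python) =====
-- def array_return(input_array, length=2):
--     def cat(x):
--         return -1 if x < 0 else (1 if x > 0 else 0)
--     keep = set()
--     for c in (-1, 1, 0):
--         hits = [i for i, x in enumerate(input_array) if cat(x) == c]
--         keep.update(hits[:max(length, 0)])
--     return [i in keep for i in range(len(input_array))]
-- ===== Notes on version B (the rewrite author's own statement) =====
-- stated objective: alternative
-- what changed: Replaces A's single pass with three mutable counters by staged per-category passes: for each category collect the indices of its elements, keep the first `length` of them in a set, then emit membership of each index.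
import Mathlib
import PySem

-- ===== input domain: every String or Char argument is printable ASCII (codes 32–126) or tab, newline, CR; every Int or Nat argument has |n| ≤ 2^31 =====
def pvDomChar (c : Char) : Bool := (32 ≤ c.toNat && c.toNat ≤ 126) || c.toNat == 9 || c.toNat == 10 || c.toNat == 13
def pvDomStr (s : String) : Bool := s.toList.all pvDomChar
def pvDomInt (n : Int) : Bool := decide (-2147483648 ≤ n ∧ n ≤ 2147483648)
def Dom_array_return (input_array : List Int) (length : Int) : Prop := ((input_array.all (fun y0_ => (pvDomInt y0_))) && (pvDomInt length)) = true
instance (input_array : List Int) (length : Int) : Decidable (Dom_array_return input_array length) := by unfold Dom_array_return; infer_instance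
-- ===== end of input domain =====

-- B replaces A's single pass with three stateful counters by three staged passes:
-- for each category it collects the indices of that category, keeps the first
-- `length` of them in a set, and emits membership of each index (alternative decomposition).

-- ===== PORT A =====
-- A's for-loop over input_array with state (keep_list, l_count, c_count, m_count)
def arGoA (length : Int) (xs : List Int) (keep_list : List Bool) (l_count c_count m_count : Int) : List Bool :=
  match xs with
  | [] => keep_list
  | this_person :: rest =>
    if this_person < 0 ∧ l_count < length then
      arGoA length rest (keep_list ++ [true]) (l_count + 1) c_count m_count
    else if this_person > 0 ∧ c_count < length then
      arGoA length rest (keep_list ++ [true]) l_count (c_count + 1) m_count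
    else if this_person = 0 ∧ m_count < length then
      arGoA length rest (keep_list ++ [true]) l_count c_count (m_count + 1)
    else
      arGoA length rest (keep_list ++ [false]) l_count c_count m_count

def array_return (input_array : List Int) (length : Int) : List Bool :=
  arGoA length input_array [] 0 0 0

-- ===== PORT B =====
-- cat(x) from Source B
def catB (x : Int) : Int := if x < 0 then -1 else if x > 0 then 1 else 0

-- hits = [i for i, x in enumerate(input_array) if cat(x) == c]
def hitsB (input_array : List Int) (c : Int) : List Int :=
  ((PySem.List.enumerate input_array).filter (fun p => catB p.2 == c)).map (fun p => p.1)

-- Source B: for c in (-1, 1, 0): keep.update(hits[:max(length, 0)]);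
--       then [i in keep for i in range(len(input_array))]
def array_return_alt (input_array : List Int) (length : Int) : List Bool :=
  let keep := [(-1 : Int), 1, 0].foldl
    (fun s c => PySem.Set.update s
      (PySem.List.slice (hitsB input_array c) none (some (max length 0))))
    PySem.Set.empty
  (PySem.List.pyRange 0 (input_array.length : Int) 1).map (fun i => PySem.Set.contains keep i)

-- ===== PRECONDITION & SPEC =====
def Spec_array_return (input_array : List Int) (length : Int) (out : List Bool) : Prop := out = array_return_alt input_array length
instance (input_array : List Int) (length : Int) (out : List Bool) : Decidable (Spec_array_return input_array length out) := by unfold Spec_array_return; infer_instance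

-- ===== CLAIM (what is proved, stated in full; the proofs are below) =====
def Claim_equal_array_return : Prop := ∀ (input_array : List Int) (length : Int), Dom_array_return input_array length → Spec_array_return input_array length (array_return input_array length)

-- ===== LEMMAS AND PROOFS =====

-- the common characterisation: the bit for x after prefix pre is "same-category count in pre < length"
def specGo (length : Int) (pre xs : List Int) : List Bool :=
  match xs with
  | [] => []
  | x :: r => decide ((pre.countP (fun y => catB y == catB x) : Int) < length) :: specGo length (pre ++ [x]) r

theorem catB_neg {x : Int} (hx : x < 0) : catB x = -1 := by
  simp [catB, hx]

theorem catB_pos {x : Int} (hx : 0 < x) : catB x = 1 := by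
  simp [catB, show ¬ x < 0 by omega, hx]

theorem catB_zero : catB 0 = 0 := by decide

theorem catPred_neg_one : (fun y => catB y == (-1 : Int)) = fun y => decide (y < 0) := by
  funext y; rcases lt_trichotomy y 0 with h | h | h
  · simp [catB_neg h, h]
  · subst h; simp [catB_zero]
  · simp [catB_pos h]; omega

theorem catPred_one : (fun y => catB y == (1 : Int)) = fun y => decide (0 < y) := by
  funext y; rcases lt_trichotomy y 0 with h | h | h
  · simp [catB_neg h]; omega
  · subst h; simp [catB_zero]
  · simp [catB_pos h, h]

theorem catPred_zero : (fun y => catB y == (0 : Int)) = fun y => decide (y = 0) := by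
  funext y; rcases lt_trichotomy y 0 with h | h | h
  · simp [catB_neg h]; omega
  · subst h; simp [catB_zero]
  · simp [catB_pos h]; omega

-- A's counters are the clamped same-category prefix counts
theorem arGoA_eq_specGo (length : Int) (xs : List Int) : ∀ (pre : List Int) (acc : List Bool),
    arGoA length xs acc
      (min (pre.countP (fun y => decide (y < 0)) : Int) (max length 0))
      (min (pre.countP (fun y => decide (0 < y)) : Int) (max length 0))
      (min (pre.countP (fun y => decide (y = 0)) : Int) (max length 0))
    = acc ++ specGo length pre xs := by
  induction xs with
  | nil => intro pre acc; simp [arGoA, specGo]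
  | cons x r ih =>
    intro pre acc
    set M := max length 0 with hM
    have hN : (0 : Int) ≤ (pre.countP (fun y => decide (y < 0)) : Int) := Int.natCast_nonneg _
    have hP : (0 : Int) ≤ (pre.countP (fun y => decide (0 < y)) : Int) := Int.natCast_nonneg _
    have hZ : (0 : Int) ≤ (pre.countP (fun y => decide (y = 0)) : Int) := Int.natCast_nonneg _
    rcases lt_trichotomy x 0 with hx | hx | hx
    · have hcat : (fun y => catB y == catB x) = fun y => decide (y < 0) := by
        rw [catB_neg hx]; exact catPred_neg_one
      by_cases hc : (pre.countP (fun y => decide (y < 0)) : Int) < length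
      · rw [arGoA, if_pos ⟨hx, by omega⟩]
        have : min (pre.countP (fun y => decide (y < 0)) : Int) M + 1
            = min ((pre ++ [x]).countP (fun y => decide (y < 0)) : Int) M := by
          rw [List.countP_append]; simp [hx]; omega
        rw [this]
        have h2 : ((pre ++ [x]).countP (fun y => decide (0 < y))) = pre.countP (fun y => decide (0 < y)) := by
          rw [List.countP_append]; simp; omega
        have h3 : ((pre ++ [x]).countP (fun y => decide (y = 0))) = pre.countP (fun y => decide (y = 0)) := by
          rw [List.countP_append]; simp; omega
        rw [← h2, ← h3, ih]
        simp [specGo, hcat, hc]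
      · rw [arGoA, if_neg (by intro h; exact hc (by omega)), if_neg (by omega),
            if_neg (by omega)]
        have h1 : ((pre ++ [x]).countP (fun y => decide (y < 0))) = pre.countP (fun y => decide (y < 0)) + 1 := by
          rw [List.countP_append]; simp [hx]
        have hmin : min ((pre ++ [x]).countP (fun y => decide (y < 0)) : Int) M
            = min (pre.countP (fun y => decide (y < 0)) : Int) M := by
          rw [h1]; push_cast; omega
        have h2 : ((pre ++ [x]).countP (fun y => decide (0 < y))) = pre.countP (fun y => decide (0 < y)) := by
          rw [List.countP_append]; simp; omega
        have h3 : ((pre ++ [x]).countP (fun y => decide (y = 0))) = pre.countP (fun y => decide (y = 0)) := by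
          rw [List.countP_append]; simp; omega
        rw [← hmin, ← h2, ← h3, ih]
        simp [specGo, hcat, hc]
    · have hcat : (fun y => catB y == catB x) = fun y => decide (y = 0) := by
        rw [hx, catB_zero]; exact catPred_zero
      by_cases hc : (pre.countP (fun y => decide (y = 0)) : Int) < length
      · rw [arGoA, if_neg (by omega), if_neg (by omega), if_pos ⟨hx, by omega⟩]
        have : min (pre.countP (fun y => decide (y = 0)) : Int) M + 1
            = min ((pre ++ [x]).countP (fun y => decide (y = 0)) : Int) M := by
          rw [List.countP_append]; simp [hx]; omega
        rw [this]
        have h1 : ((pre ++ [x]).countP (fun y => decide (y < 0))) = pre.countP (fun y => decide (y < 0)) := by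
          rw [List.countP_append]; simp; omega
        have h2 : ((pre ++ [x]).countP (fun y => decide (0 < y))) = pre.countP (fun y => decide (0 < y)) := by
          rw [List.countP_append]; simp; omega
        rw [← h1, ← h2, ih]
        simp [specGo, hcat, hc]
      · rw [arGoA, if_neg (by omega), if_neg (by omega),
            if_neg (by intro h; exact hc (by omega))]
        have h3 : ((pre ++ [x]).countP (fun y => decide (y = 0))) = pre.countP (fun y => decide (y = 0)) + 1 := by
          rw [List.countP_append]; simp [hx]
        have hmin : min ((pre ++ [x]).countP (fun y => decide (y = 0)) : Int) M
            = min (pre.countP (fun y => decide (y = 0)) : Int) M := by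
          rw [h3]; push_cast; omega
        have h1 : ((pre ++ [x]).countP (fun y => decide (y < 0))) = pre.countP (fun y => decide (y < 0)) := by
          rw [List.countP_append]; simp; omega
        have h2 : ((pre ++ [x]).countP (fun y => decide (0 < y))) = pre.countP (fun y => decide (0 < y)) := by
          rw [List.countP_append]; simp; omega
        rw [← h1, ← h2, ← hmin, ih]
        simp [specGo, hcat, hc]
    · have hcat : (fun y => catB y == catB x) = fun y => decide (0 < y) := by
        rw [catB_pos hx]; exact catPred_one
      by_cases hc : (pre.countP (fun y => decide (0 < y)) : Int) < length
      · rw [arGoA, if_neg (by omega), if_pos ⟨hx, by omega⟩]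
        have : min (pre.countP (fun y => decide (0 < y)) : Int) M + 1
            = min ((pre ++ [x]).countP (fun y => decide (0 < y)) : Int) M := by
          rw [List.countP_append]; simp [hx]; omega
        rw [this]
        have h1 : ((pre ++ [x]).countP (fun y => decide (y < 0))) = pre.countP (fun y => decide (y < 0)) := by
          rw [List.countP_append]; simp; omega
        have h3 : ((pre ++ [x]).countP (fun y => decide (y = 0))) = pre.countP (fun y => decide (y = 0)) := by
          rw [List.countP_append]; simp; omega
        rw [← h1, ← h3, ih]
        simp [specGo, hcat, hc]
      · rw [arGoA, if_neg (by omega), if_neg (by intro h; exact hc (by omega)),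
            if_neg (by omega)]
        have h2 : ((pre ++ [x]).countP (fun y => decide (0 < y))) = pre.countP (fun y => decide (0 < y)) + 1 := by
          rw [List.countP_append]; simp [hx]
        have hmin : min ((pre ++ [x]).countP (fun y => decide (0 < y)) : Int) M
            = min (pre.countP (fun y => decide (0 < y)) : Int) M := by
          rw [h2]; push_cast; omega
        have h1 : ((pre ++ [x]).countP (fun y => decide (y < 0))) = pre.countP (fun y => decide (y < 0)) := by
          rw [List.countP_append]; simp; omega
        have h3 : ((pre ++ [x]).countP (fun y => decide (y = 0))) = pre.countP (fun y => decide (y = 0)) := by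
          rw [List.countP_append]; simp; omega
        rw [← h1, ← h3, ← hmin, ih]
        simp [specGo, hcat, hc]

theorem length_specGo (length : Int) (xs : List Int) : ∀ pre, (specGo length pre xs).length = xs.length := by
  induction xs with
  | nil => intro pre; simp [specGo]
  | cons x r ih => intro pre; simp [specGo, ih]

theorem getElem_specGo (length : Int) (xs : List Int) : ∀ (pre : List Int) (k : Nat)
    (hk : k < xs.length) (hk' : k < (specGo length pre xs).length),
    (specGo length pre xs)[k]'hk'
      = decide (((pre ++ xs.take k).countP (fun y => catB y == catB (xs[k]'hk)) : Int) < length) := by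
  induction xs with
  | nil => intro pre k hk; exact absurd hk (by simp)
  | cons x r ih =>
    intro pre k hk hk'
    cases k with
    | zero => simp [specGo]
    | succ j =>
      have hj : j < r.length := by simpa using hk
      have hj' : j < (specGo length (pre ++ [x]) r).length := by
        rw [length_specGo]; exact hj
      have := ih (pre ++ [x]) j hj hj'
      simp only [specGo, List.getElem_cons_succ, List.take_succ_cons, List.getElem_cons_succ]
      rw [this]
      simp

-- hits of category c with enumerate start s (hitsB xs c = hitsGo xs c 0)
def hitsGo (xs : List Int) (c : Int) (s : Int) : List Int :=
  ((PySem.List.enumerate xs s).filter (fun p => catB p.2 == c)).map (fun p => p.1)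

theorem hitsB_eq_hitsGo (xs : List Int) (c : Int) : hitsB xs c = hitsGo xs c 0 := rfl

theorem mem_take_hitsGo (c : Int) (xs : List Int) : ∀ (s : Int) (M : Nat) (i : Int),
    i ∈ (hitsGo xs c s).take M
      ↔ ∃ (k : Nat) (hk : k < xs.length), i = s + k ∧ catB (xs[k]'hk) = c ∧
          (xs.take k).countP (fun y => catB y == c) < M := by
  induction xs with
  | nil =>
    intro s M i
    simp [hitsGo, PySem.List.enumerate_nil]
  | cons x r ih =>
    intro s M i
    by_cases hcat : catB x = c
    · cases M with
      | zero => simp [List.take_zero]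
      | succ M =>
        have hunf : hitsGo (x :: r) c s = s :: hitsGo r c (s + 1) := by
          simp [hitsGo, PySem.List.enumerate_cons, List.filter_cons, hcat]
        rw [hunf]
        simp only [List.take_succ_cons, List.mem_cons]
        constructor
        · rintro (rfl | hmem)
          · exact ⟨0, by simp, by simp, by simpa using hcat, by simpa using Nat.succ_pos M⟩
          · obtain ⟨k, hk, hi, hc2, hcnt⟩ := (ih (s + 1) M i).mp hmem
            refine ⟨k + 1, by simpa using hk, by omega, by simpa using hc2, ?_⟩
            simp [List.take_succ_cons, List.countP_cons, hcat]
            omega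
        · rintro ⟨k, hk, hi, hc2, hcnt⟩
          cases k with
          | zero => exact Or.inl (by omega)
          | succ j =>
            refine Or.inr ((ih (s + 1) M i).mpr ⟨j, by simpa using hk, by omega,
              by simpa using hc2, ?_⟩)
            simp [List.take_succ_cons, List.countP_cons, hcat] at hcnt
            omega
    · have hunf : hitsGo (x :: r) c s = hitsGo r c (s + 1) := by
        simp [hitsGo, PySem.List.enumerate_cons, List.filter_cons, hcat]
      rw [hunf, ih (s + 1) M i]
      constructor
      · rintro ⟨k, hk, hi, hc2, hcnt⟩
        refine ⟨k + 1, by simpa using hk, by omega, by simpa using hc2, ?_⟩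
        simp [List.take_succ_cons, List.countP_cons, hcat]
        omega
      · rintro ⟨k, hk, hi, hc2, hcnt⟩
        cases k with
        | zero => exact absurd (by simpa using hc2) hcat
        | succ j =>
          refine ⟨j, by simpa using hk, by omega, by simpa using hc2, ?_⟩
          simp [List.take_succ_cons, List.countP_cons, hcat] at hcnt
          omega

theorem contains_eq_decide (s : List Int) (x : Int) : PySem.Set.contains s x = decide (x ∈ s) := by
  by_cases h : x ∈ s <;> simp [PySem.Set.contains, h]

theorem mem_foldl_add {l : List Int} : ∀ (s : List Int) (x : Int),
    x ∈ l.foldl PySem.Set.add s ↔ x ∈ s ∨ x ∈ l := by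
  induction l with
  | nil => intro s x; simp
  | cons y r ih =>
    intro s x
    rw [List.foldl_cons, ih]
    by_cases h : x = y
    · subst h
      simp [PySem.Set.add]
      split_ifs with hm <;> simp [hm]
    · simp [PySem.Set.add]
      split_ifs with hm <;> simp [h]

-- ===== VERDICT (by name: the statement is the Claim_ definition above) =====
theorem array_return_spec : Claim_equal_array_return := by
  intro xs length _
  unfold Spec_array_return array_return
  have hA := arGoA_eq_specGo length xs [] []
  simp only [List.countP_nil, Nat.cast_zero, List.nil_append] at hA
  have h0 : min (0 : Int) (max length 0) = 0 := by omega
  rw [h0] at hA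
  rw [hA]
  -- normalise B's slices to takes
  have hMnn : (0 : Int) ≤ max length 0 := le_max_right _ _
  set M : Nat := (max length 0).toNat with hMdef
  -- B's keep set, unfolded
  have hBdef : array_return_alt xs length
      = (PySem.List.pyRange 0 (xs.length : Int) 1).map
          (fun i => PySem.Set.contains
            ([(-1 : Int), 1, 0].foldl
              (fun s c => PySem.Set.update s
                (PySem.List.slice (hitsB xs c) none (some (max length 0))))
              PySem.Set.empty) i) := rfl
  rw [hBdef]
  have hslice : ∀ c : Int, PySem.List.slice (hitsB xs c) none (some (max length 0))
      = (hitsGo xs c 0).take M := fun c => by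
    rw [hitsB_eq_hitsGo]; exact PySem.List.slice_to _ hMnn
  have hkeep : ∀ i : Int,
      (i ∈ [(-1 : Int), 1, 0].foldl
        (fun s c => PySem.Set.update s
          (PySem.List.slice (hitsB xs c) none (some (max length 0))))
        PySem.Set.empty)
      ↔ i ∈ (hitsGo xs (-1) 0).take M ∨ i ∈ (hitsGo xs 1 0).take M ∨ i ∈ (hitsGo xs 0 0).take M := by
    intro i
    simp only [List.foldl_cons, List.foldl_nil, PySem.Set.update, hslice]
    rw [mem_foldl_add, mem_foldl_add, mem_foldl_add]
    simp [PySem.Set.empty]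
    tauto
  -- elementwise equality
  apply List.ext_getElem
  · rw [length_specGo]
    simp [PySem.List.length_pyRange_one]
  · intro k hk1 hk2
    have hkn : k < xs.length := by rw [length_specGo] at hk1; exact hk1
    rw [getElem_specGo length xs [] k hkn hk1]
    rw [List.getElem_map]
    have hrange : (PySem.List.pyRange 0 (xs.length : Int) 1)[k]'(by simpa using hk2) = (k : Int) := by
      rw [PySem.List.getElem_pyRange_one]; omega
    rw [hrange]
    -- membership chain
    have hmem : ((k : Int) ∈ [(-1 : Int), 1, 0].foldl
        (fun s c => PySem.Set.update s
          (PySem.List.slice (hitsB xs c) none (some (max length 0))))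
        PySem.Set.empty)
      ↔ ((xs.take k).countP (fun y => catB y == catB (xs[k]'hkn)) : Int) < length := by
      rw [hkeep]
      have hone : ∀ c : Int, ((k : Int) ∈ (hitsGo xs c 0).take M)
          ↔ (catB (xs[k]'hkn) = c ∧ (xs.take k).countP (fun y => catB y == c) < M) := by
        intro c
        rw [mem_take_hitsGo]
        constructor
        · rintro ⟨k', hk', hi, hc2, hcnt⟩
          have : k' = k := by omega
          subst this
          exact ⟨hc2, hcnt⟩
        · rintro ⟨hc2, hcnt⟩
          exact ⟨k, hkn, by omega, hc2, hcnt⟩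
      rw [hone, hone, hone]
      have hMlt : ∀ n : Nat, (n < M) ↔ ((n : Int) < length) := by
        intro n; omega
      rcases lt_trichotomy (xs[k]'hkn) 0 with h | h | h
      · rw [catB_neg h]
        simp only [show (-1 : Int) ≠ 1 by decide, show (-1 : Int) ≠ 0 by decide,
          false_and, or_false, true_and, and_false]
        rw [hMlt]
      · rw [h, catB_zero]
        simp only [show (0 : Int) ≠ -1 by decide, show (0 : Int) ≠ 1 by decide,
          false_and, false_or, true_and]
        rw [hMlt]
      · rw [catB_pos h]
        simp only [show (1 : Int) ≠ -1 by decide, show (1 : Int) ≠ 0 by decide,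
          false_and, false_or, or_false, true_and]
        rw [hMlt]
    -- Bool equality from the iff
    rw [contains_eq_decide]
    simp only [decide_eq_decide]
    exact hmem.symm
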